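-- pv_equiv track=rewrite | github.com/Prabh-Saini/inconspicuousname | noah.py | stepback
-- ===== SOURCE A (Python) =====
-- def stepback(number: int, maximum: int) -> int:
--     """if number is higher than x return back to 0 and repeat.
--     eg. if number = 7 and maximum = 2 the result is 1
--     because 0 1 2  0 1 2  0 1  (it's starting at 0)"""
--     iteration, result = 0, 0
--     if (number <= maximum) or (number <= 0):
--         return number
--
--     for _ in range(0, number):
--         if result == maximum:
--             result = 0
--         else:
--             result += 1
--
--     return result
-- ===== SOURCE B (Python) =====
-- def stepback(number: int, maximum: int) -> int:
--     period = maximum + 1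
--     if number > maximum and number > 0 and period > 0:
--         # remainder of number by the cycle length, via floor division
--         return number - period * (number // period)
--     return number
-- ===== Notes on version B (the rewrite author's own statement) =====
-- stated objective: faster
-- what changed: Replaces the O(number) counting loop with O(1) arithmetic: the cycle length period = maximum+1 and the remainder number - period*(number//period); when period <= 0 the loop's reset branch can never fire, so the value is number itself.
import Mathlib
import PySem

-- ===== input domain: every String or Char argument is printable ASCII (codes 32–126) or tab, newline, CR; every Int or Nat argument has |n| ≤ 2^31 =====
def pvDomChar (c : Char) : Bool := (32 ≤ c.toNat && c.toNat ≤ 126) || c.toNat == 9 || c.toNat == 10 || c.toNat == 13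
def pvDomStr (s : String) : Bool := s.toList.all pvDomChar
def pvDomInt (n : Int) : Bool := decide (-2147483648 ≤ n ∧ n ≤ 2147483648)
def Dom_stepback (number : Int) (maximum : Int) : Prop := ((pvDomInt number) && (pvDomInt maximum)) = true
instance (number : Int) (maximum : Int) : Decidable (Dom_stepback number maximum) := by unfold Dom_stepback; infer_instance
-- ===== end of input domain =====

-- B replaces A's O(number) counting loop with O(1) arithmetic: the cycle length and the remainder via floor division.

-- ===== PORT A =====
def stepback (number : Int) (maximum : Int) : Int :=
  if number ≤ maximum ∨ number ≤ 0 then number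
  else (PySem.List.pyRange 0 number 1).foldl
        (fun result _ => if result = maximum then 0 else result + 1) 0

-- ===== PORT B =====
def stepback_alt (number : Int) (maximum : Int) : Int :=
  let period := maximum + 1
  if number > maximum && number > 0 && period > 0 then
    number - period * PySem.Int.floordiv number period
  else
    number

-- ===== PRECONDITION & SPEC =====
def Spec_stepback (number : Int) (maximum : Int) (out : Int) : Prop := out = stepback_alt number maximum
instance (number : Int) (maximum : Int) (out : Int) : Decidable (Spec_stepback number maximum out) := by unfold Spec_stepback; infer_instance

-- ===== CLAIM =====
def Claim_equal_stepback : Prop := ∀ (number : Int) (maximum : Int), Dom_stepback number maximum → Spec_stepback number maximum (stepback number maximum)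

-- ===== LEMMAS AND PROOFS =====

-- with maximum < 0 the reset branch never fires for a nonnegative accumulator
theorem pv_fold_neg (m : Int) (hm : m < 0) :
    ∀ (l : List Int) (r : Int), 0 ≤ r →
      l.foldl (fun result _ => if result = m then 0 else result + 1) r = r + l.length := by
  intro l
  induction l with
  | nil => intro r _; simp
  | cons x xs ih =>
    intro r hr
    have hne : r ≠ m := by omega
    simp only [List.foldl_cons, if_neg hne]
    rw [ih (r + 1) (by omega)]
    simp; ring

-- with 0 ≤ maximum the loop computes addition modulo maximum+1
theorem pv_fold_mod (m : Int) (hm : 0 ≤ m) :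
    ∀ (l : List Int) (r : Int), 0 ≤ r → r ≤ m →
      l.foldl (fun result _ => if result = m then 0 else result + 1) r
        = (r + l.length) % (m + 1) := by
  intro l
  induction l with
  | nil =>
    intro r h0 h1
    have := Int.emod_eq_of_lt h0 (show r < m + 1 by omega)
    simp [this]
  | cons x xs ih =>
    intro r h0 h1
    by_cases h : r = m
    · simp only [List.foldl_cons, if_pos h, List.length_cons]
      rw [ih 0 le_rfl hm]
      have e : r + (((xs.length + 1 : Nat)) : Int) = (0 + (xs.length : Int)) + 1 * (m + 1) := by
        push_cast; omega
      rw [e, Int.add_mul_emod_self_right]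
    · simp only [List.foldl_cons, if_neg h, List.length_cons]
      rw [ih (r + 1) (by omega) (by omega)]
      congr 1
      push_cast; ring

-- ===== VERDICT =====
theorem stepback_spec : Claim_equal_stepback := by
  intro number maximum _
  unfold Spec_stepback stepback stepback_alt
  by_cases hbase : number ≤ maximum ∨ number ≤ 0
  · rw [if_pos hbase]
    simp only []
    rw [if_neg (by simp only [Bool.and_eq_true, decide_eq_true_eq]; omega)]
  · push Not at hbase
    obtain ⟨h1, h2⟩ := hbase
    rw [if_neg (by omega)]
    by_cases hm : maximum < 0
    · rw [pv_fold_neg maximum hm _ 0 le_rfl]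
      simp only []
      rw [if_neg (by simp only [Bool.and_eq_true, decide_eq_true_eq]; omega)]
      simp [PySem.List.length_pyRange_one]
      omega
    · push Not at hm
      rw [pv_fold_mod maximum hm _ 0 le_rfl hm]
      simp only []
      rw [if_pos (by simp only [Bool.and_eq_true, decide_eq_true_eq]; omega)]
      rw [PySem.Int.floordiv_eq_ediv_of_pos (by omega)]
      have hlen : ((PySem.List.pyRange 0 number 1).length : Int) = number := by
        simp [PySem.List.length_pyRange_one]
        omega
      rw [hlen, Int.emod_def]
      ring
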